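-- pv_equiv track=rewrite | github.com/uriayaso/Light-source-and-object-proximity-detector-system | PC_SIDE/GUI.py | segment_runs_with_gap
-- ===== SOURCE A (Python) =====
-- def segment_runs_with_gap(flags, max_gap=1, min_len=2):
--     """כמו segment_runs אבל מאפשר 'חור' של עד max_gap דגימות false בתוך ריצה."""
--     runs = []
--     n = len(flags)
--     i = 0
--     while i < n:
--         # דלג ל-true הראשון
--         while i < n and not flags[i]:
--             i += 1
--         if i >= n:
--             break
--         j = i
--         gaps = 0
--         last_true = i
--         # התקדמות בריצה עם רשות לחורים קטנים
--         while j + 1 < n: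
--             if flags[j + 1]:
--                 j += 1
--                 last_true = j
--                 gaps = 0
--             else:
--                 if gaps < max_gap:
--                     gaps += 1
--                     j += 1
--                 else:
--                     break
--         if last_true - i + 1 >= min_len:
--             runs.append((i, last_true))
--         i = last_true + 1
--     return runs
-- ===== SOURCE B (Python) =====
-- def segment_runs_with_gap(flags, max_gap=1, min_len=2):
--     # Pass 1: index all maximal strict true-intervals.
--     intervals = []
--     start = None
--     for idx, f in enumerate(flags):
--         if f:
--             if start is None:
--                 start = idx
--         else:
--             if start is not None:
--                 intervals.append((start, idx - 1))
--                 start = None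
--     if start is not None:
--         intervals.append((start, len(flags) - 1))
--     # Pass 2: merge consecutive intervals while the false-gap is <= max_gap.
--     runs = []
--     for s, e in intervals:
--         if runs and s - runs[-1][1] - 1 <= max_gap:
--             runs[-1] = (runs[-1][0], e)
--         else:
--             runs.append((s, e))
--     return [(s, e) for s, e in runs if e - s + 1 >= min_len]
-- ===== Notes on version B (the rewrite author's own statement) =====
-- stated objective: alternative
-- what changed: Replaces A's single fused index-walking while-loop (skip falses, then advance with a gap counter) by two passes: first build the list of maximal strict true-intervals, then merge consecutive intervals whose false-gap is <= max_gap and filter by min_len.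
import Mathlib
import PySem

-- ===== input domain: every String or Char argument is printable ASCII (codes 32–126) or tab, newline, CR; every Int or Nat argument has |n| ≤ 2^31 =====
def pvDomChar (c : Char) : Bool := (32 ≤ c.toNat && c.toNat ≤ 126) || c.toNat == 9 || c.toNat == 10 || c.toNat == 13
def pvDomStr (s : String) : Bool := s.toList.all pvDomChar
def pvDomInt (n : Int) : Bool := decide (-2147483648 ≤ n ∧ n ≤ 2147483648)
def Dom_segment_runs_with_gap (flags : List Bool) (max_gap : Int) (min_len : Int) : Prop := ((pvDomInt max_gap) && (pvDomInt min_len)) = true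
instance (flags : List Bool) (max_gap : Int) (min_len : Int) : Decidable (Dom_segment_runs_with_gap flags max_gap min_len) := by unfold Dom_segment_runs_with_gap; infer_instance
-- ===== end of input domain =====

-- B replaces A's fused index-walking loop by two passes (build maximal true-intervals, then merge across small gaps); alternative decomposition, same cost.


-- ===== PORT A =====
-- A's inner `while i < n and not flags[i]` skip loop.
def skipA (flags : List Bool) (i : Nat) : Nat :=
  if _h : i < flags.length then
    if flags.getD i false then i else skipA flags (i + 1)
  else i
termination_by flags.length - i
decreasing_by exact Nat.sub_succ_lt_self _ _ _h

-- A's inner `while j + 1 < n` loop; returns the final last_true.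
def innerA (flags : List Bool) (max_gap : Int) (j : Nat) (gaps : Int) (last_true : Nat) : Nat :=
  if _h : j + 1 < flags.length then
    if flags.getD (j + 1) false then innerA flags max_gap (j + 1) 0 (j + 1)
    else if gaps < max_gap then innerA flags max_gap (j + 1) (gaps + 1) last_true
    else last_true
  else last_true
termination_by flags.length - j
decreasing_by all_goals exact Nat.sub_succ_lt_self _ _ (Nat.lt_of_succ_lt _h)

-- termination helpers for outerA (cited by its decreasing_by)
theorem skipA_ge_aux (flags : List Bool) : ∀ d i, flags.length - i ≤ d → i ≤ skipA flags i := by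
  intro d
  induction d with
  | zero =>
    intro i hd
    rw [skipA]
    split
    · rename_i h; omega
    · exact le_refl i
  | succ d ih =>
    intro i hd
    rw [skipA]
    split
    · rename_i h
      split
      · exact le_refl i
      · have := ih (i + 1) (by omega); omega
    · exact le_refl i

theorem skipA_ge (flags : List Bool) (i : Nat) : i ≤ skipA flags i :=
  skipA_ge_aux flags (flags.length - i) i (le_refl _)

theorem innerA_ge_aux (flags : List Bool) (max_gap : Int) :
    ∀ d j (gaps : Int) (lt : Nat), flags.length - j ≤ d → lt ≤ j →
      lt ≤ innerA flags max_gap j gaps lt := by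
  intro d
  induction d with
  | zero =>
    intro j gaps lt hd hlt
    rw [innerA]
    split
    · rename_i h; omega
    · exact le_refl lt
  | succ d ih =>
    intro j gaps lt hd hlt
    rw [innerA]
    split
    · rename_i h
      split
      · have := ih (j + 1) 0 (j + 1) (by omega) (le_refl _); omega
      · split
        · exact ih (j + 1) (gaps + 1) lt (by omega) (by omega)
        · exact le_refl lt
    · exact le_refl lt

theorem innerA_ge' (flags : List Bool) (max_gap : Int) (j : Nat) (gaps : Int) (last_true : Nat)
    (h : last_true ≤ j) : last_true ≤ innerA flags max_gap j gaps last_true :=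
  innerA_ge_aux flags max_gap (flags.length - j) j gaps last_true (le_refl _) h

-- A's outer `while i < n` loop, with runs.append as acc ++ [..].
def outerA (flags : List Bool) (max_gap min_len : Int) (i : Nat) (acc : List (Int × Int)) : List (Int × Int) :=
  if _h : i < flags.length then
    let i' := skipA flags i
    if _h2 : flags.length ≤ i' then acc
    else
      let lt := innerA flags max_gap i' (0 : Int) i'
      let acc' := if (lt : Int) - (i' : Int) + 1 ≥ min_len then acc ++ [((i' : Int), (lt : Int))] else acc
      outerA flags max_gap min_len (lt + 1) acc'
  else acc
termination_by flags.length - i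
decreasing_by
  exact Nat.sub_lt_sub_left _h (Nat.lt_succ_of_le (le_trans (skipA_ge flags i)
    (innerA_ge' flags max_gap (skipA flags i) (0 : Int) (skipA flags i) (le_refl _))))

def segment_runs_with_gap (flags : List Bool) (max_gap : Int) (min_len : Int) : List (Int × Int) :=
  outerA flags max_gap min_len 0 []

-- ===== PORT B =====
-- pass 1 of Source B: maximal strict true-intervals, scanning with the current open start.
def ivsB : List Bool → Nat → Option Nat → List (Nat × Nat)
  | [], _, none => []
  | [], idx, some s => [(s, idx - 1)]
  | b :: r, idx, none => if b then ivsB r (idx + 1) (some idx) else ivsB r (idx + 1) none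
  | b :: r, idx, some s => if b then ivsB r (idx + 1) (some s) else (s, idx - 1) :: ivsB r (idx + 1) none

-- pass 2 of Source B: merge the current run (cs,ce) with following intervals while the gap is small.
def mergeB (mg : Int) (cs ce : Nat) : List (Nat × Nat) → List (Nat × Nat)
  | [] => [(cs, ce)]
  | (s, e) :: rest =>
      if (s : Int) - (ce : Int) - 1 ≤ mg then mergeB mg cs e rest
      else (cs, ce) :: mergeB mg s e rest

def mergeTop (mg : Int) : List (Nat × Nat) → List (Nat × Nat)
  | [] => []
  | (s, e) :: rest => mergeB mg s e rest

def segment_runs_with_gap_alt (flags : List Bool) (max_gap : Int) (min_len : Int) : List (Int × Int) :=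
  (((mergeTop max_gap (ivsB flags 0 none)).filter
      (fun p => (p.2 : Int) - (p.1 : Int) + 1 ≥ min_len)).map
    (fun p => ((p.1 : Int), (p.2 : Int))))

-- ===== PRECONDITION & SPEC =====
def Spec_segment_runs_with_gap (flags : List Bool) (max_gap : Int) (min_len : Int) (out : List (Int × Int)) : Prop := out = segment_runs_with_gap_alt flags max_gap min_len
instance (flags : List Bool) (max_gap : Int) (min_len : Int) (out : List (Int × Int)) : Decidable (Spec_segment_runs_with_gap flags max_gap min_len out) := by unfold Spec_segment_runs_with_gap; infer_instance

-- ===== CLAIM (what is proved, stated in full; the proofs are below) =====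
def Claim_equal_segment_runs_with_gap : Prop := ∀ (flags : List Bool) (max_gap : Int) (min_len : Int), Dom_segment_runs_with_gap flags max_gap min_len → Spec_segment_runs_with_gap flags max_gap min_len (segment_runs_with_gap flags max_gap min_len)

-- ===== LEMMAS AND PROOFS =====

-- Invariant: T is exactly the list of maximal true-intervals of flags at positions ≥ i,
-- everything in [i, first start) is false, intervals are true throughout and followed by a false (or the end).
def Good (flags : List Bool) : Nat → List (Nat × Nat) → Prop
  | i, [] => ∀ k, i ≤ k → k < flags.length → flags.getD k false = false
  | i, (s, e) :: rest =>
      i ≤ s ∧ s ≤ e ∧ e < flags.length ∧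
      (∀ k, i ≤ k → k < s → flags.getD k false = false) ∧
      (∀ k, s ≤ k → k ≤ e → flags.getD k false = true) ∧
      (e + 1 = flags.length ∨ flags.getD (e + 1) false = false) ∧
      Good flags (e + 1) rest

-- how far A's inner loop merges, and what intervals remain
def mSplit (mg : Int) : Nat → List (Nat × Nat) → Nat × List (Nat × Nat)
  | e, [] => (e, [])
  | e, (s₁, e₁) :: r =>
      if (s₁ : Int) - (e : Int) - 1 ≤ mg then mSplit mg e₁ r else (e, (s₁, e₁) :: r)

theorem mSplit_len (mg : Int) : ∀ r e, (mSplit mg e r).2.length ≤ r.length := by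
  intro r
  induction r with
  | nil => intro e; simp [mSplit]
  | cons p r ih =>
    intro e; obtain ⟨s₁, e₁⟩ := p
    by_cases h : (s₁ : Int) - (e : Int) - 1 ≤ mg
    · simp only [mSplit, if_pos h, List.length_cons]; have := ih e₁; omega
    · simp only [mSplit, if_neg h]; exact le_refl _

theorem good_cons_false (flags : List Bool) (i : Nat) (L : List (Nat × Nat))
    (hf : flags.getD i false = false) (hg : Good flags (i + 1) L) : Good flags i L := by
  cases L with
  | nil =>
    intro k hk1 hk2
    rcases Nat.eq_or_lt_of_le hk1 with h | h
    · exact h ▸ hf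
    · exact hg k h hk2
  | cons p rest =>
    obtain ⟨s, e⟩ := p
    obtain ⟨h1, h2, h3, h4, h5, h6, h7⟩ := hg
    refine ⟨by omega, h2, h3, ?_, h5, h6, h7⟩
    intro k hk1 hk2
    rcases Nat.eq_or_lt_of_le hk1 with h | h
    · exact h ▸ hf
    · exact h4 k h hk2

theorem ivsB_good (flags : List Bool) : ∀ (rest : List Bool) (idx : Nat),
    flags.length = idx + rest.length →
    (∀ t, flags.getD (idx + t) false = rest.getD t false) →
    (Good flags idx (ivsB rest idx none) ∧
     ∀ s, s < idx → (∀ k, s ≤ k → k < idx → flags.getD k false = true) →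
       ∃ e tail, ivsB rest idx (some s) = (s, e) :: tail ∧ idx ≤ e + 1 ∧ e < flags.length ∧
         (∀ k, s ≤ k → k ≤ e → flags.getD k false = true) ∧
         (e + 1 = flags.length ∨ flags.getD (e + 1) false = false) ∧
         Good flags (e + 1) tail) := by
  intro rest
  induction rest with
  | nil =>
    intro idx hlen hget
    have hn : flags.length = idx := by simpa using hlen
    constructor
    · intro k hk1 hk2; omega
    · intro s hs htrue
      refine ⟨idx - 1, [], rfl, by omega, by omega, ?_, ?_, ?_⟩
      · intro k hk1 hk2; exact htrue k hk1 (by omega)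
      · left; omega
      · intro k hk1 hk2; omega
  | cons b r ih =>
    intro idx hlen hget
    have hb : flags.getD idx false = b := by have := hget 0; simpa using this
    have hlen' : flags.length = (idx + 1) + r.length := by simp at hlen ⊢; omega
    have hget' : ∀ t, flags.getD (idx + 1 + t) false = r.getD t false := by
      intro t; have := hget (t + 1); simp at this ⊢; rw [show idx + 1 + t = idx + (t+1) by omega]; simpa using this
    obtain ⟨ihn, ihs⟩ := ih (idx + 1) hlen' hget'
    constructor
    · -- none state
      cases hB : b with
      | true =>
        simp only [ivsB, if_pos]
        obtain ⟨e, tail, heq, h1, h2, h3, h4, h5⟩ := ihs idx (by omega)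
          (by intro k hk1 hk2; have hki : k = idx := (by omega); rw [hki]; exact hb.trans hB)
        rw [heq]
        exact ⟨le_refl idx, by omega, h2, by intro k hk1 hk2; omega, h3, h4, h5⟩
      | false =>
        simp only [ivsB, Bool.false_eq_true, if_neg, not_false_iff]
        exact good_cons_false flags idx _ (hb.trans hB) ihn
    · -- some s state
      intro s hs htrue
      cases hB : b with
      | true =>
        simp only [ivsB, if_pos]
        obtain ⟨e, tail, heq, h1, h2, h3, h4, h5⟩ := ihs s (by omega)
          (by intro k hk1 hk2
              rcases Nat.lt_or_ge k idx with h | h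
              · exact htrue k hk1 h
              · have hki : k = idx := (by omega); rw [hki]; exact hb.trans hB)
        exact ⟨e, tail, heq, by omega, h2, h3, h4, h5⟩
      | false =>
        simp only [ivsB, Bool.false_eq_true, if_neg, not_false_iff]
        refine ⟨idx - 1, ivsB r (idx + 1) none, by rfl, by omega, by omega, ?_, ?_, ?_⟩
        · intro k hk1 hk2; exact htrue k hk1 (by omega)
        · right; rw [show idx - 1 + 1 = idx by omega]; exact hb.trans hB
        · rw [show idx - 1 + 1 = idx by omega]
          exact good_cons_false flags idx _ (hb.trans hB) ihn

-- element-level walking lemmas for A's loops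
theorem skip_ge_len (flags : List Bool) : ∀ d i, flags.length - i ≤ d →
    (∀ k, i ≤ k → k < flags.length → flags.getD k false = false) →
    flags.length ≤ skipA flags i := by
  intro d
  induction d with
  | zero =>
    intro i hd hf
    rw [skipA]
    split
    · omega
    · omega
  | succ d ih =>
    intro i hd hf
    rw [skipA]
    split
    · rename_i h
      rw [hf i (le_refl i) h]
      simp only [Bool.false_eq_true, if_neg, not_false_iff]
      exact ih (i + 1) (by omega) (fun k hk1 hk2 => hf k (by omega) hk2)
    · omega

theorem skip_to (flags : List Bool) : ∀ d i s, s - i ≤ d → i ≤ s → s < flags.length →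
    (∀ k, i ≤ k → k < s → flags.getD k false = false) →
    flags.getD s false = true → skipA flags i = s := by
  intro d
  induction d with
  | zero =>
    intro i s hd hi hs hf ht
    have he : i = s := by omega
    subst he
    rw [skipA, dif_pos hs, if_pos ht]
  | succ d ih =>
    intro i s hd hi hs hf ht
    rcases Nat.eq_or_lt_of_le hi with h | h
    · subst h; rw [skipA, dif_pos hs, if_pos ht]
    · rw [skipA]
      have hi' : i < flags.length := by omega
      rw [hf i (le_refl i) h]
      simp only [hi', dif_pos, Bool.false_eq_true, if_neg, not_false_iff]
      exact ih (i + 1) s (by omega) (by omega) hs (fun k hk1 hk2 => hf k (by omega) hk2) ht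

theorem inner_all_false (flags : List Bool) (mg : Int) : ∀ d j (gaps : Int) lt, flags.length - j ≤ d →
    (∀ k, j < k → k < flags.length → flags.getD k false = false) →
    innerA flags mg j gaps lt = lt := by
  intro d
  induction d with
  | zero =>
    intro j gaps lt hd hf
    rw [innerA]
    split
    · omega
    · rfl
  | succ d ih =>
    intro j gaps lt hd hf
    rw [innerA]
    split
    · rename_i h
      rw [hf (j + 1) (by omega) h]
      simp only [Bool.false_eq_true, if_neg, not_false_iff]
      split
      · exact ih (j + 1) _ lt (by omega) (fun k hk1 hk2 => hf k (by omega) hk2)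
      · rfl
    · rfl

theorem inner_cross (flags : List Bool) (mg : Int) : ∀ d j lt (e s₁ : Nat), s₁ - j ≤ d →
    e ≤ j → j < s₁ → s₁ < flags.length →
    (∀ k, e < k → k < s₁ → flags.getD k false = false) →
    flags.getD s₁ false = true → (s₁ : Int) - (e : Int) - 1 ≤ mg →
    innerA flags mg j ((j : Int) - (e : Int)) lt = innerA flags mg s₁ 0 s₁ := by
  intro d
  induction d with
  | zero => intro j lt e s₁ hd h1 h2; omega
  | succ d ih =>
    intro j lt e s₁ hd he hj hs hf ht hg
    rw [innerA]
    have hjn : j + 1 < flags.length := by omega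
    simp only [hjn, dif_pos]
    by_cases h : j + 1 = s₁
    · rw [h, ht]; simp
    · have h' : j + 1 < s₁ := by omega
      rw [hf (j + 1) (by omega) h']
      simp only [Bool.false_eq_true, if_neg, not_false_iff]
      have : (j : Int) - (e : Int) < mg := by omega
      simp only [this, if_pos]
      have := ih (j + 1) lt e s₁ (by omega) (by omega) h' hs hf ht hg
      rw [show (j : Int) - (e : Int) + 1 = ((j + 1 : Nat) : Int) - (e : Int) by push_cast; ring] at *
      exact this

theorem inner_within (flags : List Bool) (mg : Int) : ∀ d (s₁ e₁ : Nat), e₁ - s₁ ≤ d →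
    s₁ ≤ e₁ → e₁ < flags.length →
    (∀ k, s₁ ≤ k → k ≤ e₁ → flags.getD k false = true) →
    innerA flags mg s₁ 0 s₁ = innerA flags mg e₁ 0 e₁ := by
  intro d
  induction d with
  | zero =>
    intro s₁ e₁ hd h1 h2 h3
    have he : s₁ = e₁ := by omega
    rw [he]
  | succ d ih =>
    intro s₁ e₁ hd h1 h2 ht
    rcases Nat.eq_or_lt_of_le h1 with h | h
    · rw [h]
    · rw [innerA]
      have : s₁ + 1 < flags.length := by omega
      simp only [this, dif_pos]
      rw [ht (s₁ + 1) (by omega) (by omega)]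
      simp only [if_pos]
      exact ih (s₁ + 1) e₁ (by omega) (by omega) h2 (fun k hk1 hk2 => ht k (by omega) hk2)

theorem inner_blocked (flags : List Bool) (mg : Int) : ∀ d j lt (e s₁ : Nat), s₁ - j ≤ d →
    e ≤ j → (j : Int) - (e : Int) ≤ max mg 0 → j < s₁ → e + 1 < s₁ → s₁ ≤ flags.length →
    (∀ k, e < k → k < s₁ → flags.getD k false = false) →
    (s₁ : Int) - (e : Int) - 1 > mg →
    innerA flags mg j ((j : Int) - (e : Int)) lt = lt := by
  intro d
  induction d with
  | zero => intro j lt e s₁ hd h1 h2 h3; omega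
  | succ d ih =>
    intro j lt e s₁ hd he hinv hj he1 hs hf hg
    rw [innerA]
    split
    · rename_i h
      have hj1 : j + 1 < s₁ := by
        by_cases hmg : (0 : Int) ≤ mg
        · have h1 : (j : Int) ≤ (e : Int) + mg := by
            have : max mg 0 = mg := by omega
            omega
          omega
        · have h2 : (j : Int) - (e : Int) ≤ 0 := by
            have : max mg 0 = 0 := by omega
            omega
          have : j = e := by omega
          omega
      rw [hf (j + 1) (by omega) hj1]
      simp only [Bool.false_eq_true, if_neg, not_false_iff]
      split
      · rename_i hlt
        have := ih (j + 1) lt e s₁ (by omega) (by omega) (by omega) hj1 he1 hs hf hg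
        rw [show (j : Int) - (e : Int) + 1 = ((j + 1 : Nat) : Int) - (e : Int) by push_cast; ring] at *
        exact this
      · rfl
    · rfl

theorem inner_good (flags : List Bool) (mg : Int) : ∀ (rest : List (Nat × Nat)) (e : Nat),
    e < flags.length →
    (e + 1 = flags.length ∨ flags.getD (e + 1) false = false) →
    Good flags (e + 1) rest →
    innerA flags mg e 0 e = (mSplit mg e rest).1 ∧
    e ≤ (mSplit mg e rest).1 ∧
    Good flags ((mSplit mg e rest).1 + 1) (mSplit mg e rest).2 := by
  intro rest
  induction rest with
  | nil =>
    intro e hen hdis hg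
    refine ⟨?_, le_refl e, hg⟩
    have h0 : ((0 : Int)) = (e : Int) - (e : Int) := by ring
    exact inner_all_false flags mg flags.length e 0 e (by omega)
      (by intro k hk1 hk2
          rcases Nat.eq_or_lt_of_le (Nat.succ_le_of_lt hk1) with h | h
          · rcases hdis with h' | h'
            · omega
            · rw [← h]; exact h'
          · exact hg k (by omega) hk2)
  | cons p r ih =>
    intro e hen hdis hg
    obtain ⟨s₁, e₁⟩ := p
    obtain ⟨h1, h2, h3, h4, h5, h6, h7⟩ := hg
    have hfe1 : flags.getD (e + 1) false = false := by
      rcases hdis with h | h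
      · omega
      · exact h
    have hs1 : e + 1 < s₁ := by
      rcases Nat.eq_or_lt_of_le h1 with h | h
      · exfalso
        have := h5 s₁ (le_refl s₁) h2
        rw [← h] at this
        rw [hfe1] at this
        exact absurd this (by simp)
      · exact h
    have hfalses : ∀ k, e < k → k < s₁ → flags.getD k false = false := by
      intro k hk1 hk2
      rcases Nat.eq_or_lt_of_le (Nat.succ_le_of_lt hk1) with h | h
      · rw [← h]; exact hfe1
      · exact h4 k (by omega) hk2
    by_cases hgap : (s₁ : Int) - (e : Int) - 1 ≤ mg
    · -- merges: walk falses to s₁, trues to e₁, recurse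
      have step1 : innerA flags mg e 0 e = innerA flags mg s₁ 0 s₁ := by
        have := inner_cross flags mg s₁ e e e s₁ (by omega) (le_refl e) (by omega) (by omega)
          hfalses (h5 s₁ (le_refl s₁) h2) hgap
        simpa using this
      have step2 : innerA flags mg s₁ 0 s₁ = innerA flags mg e₁ 0 e₁ :=
        inner_within flags mg (e₁ - s₁) s₁ e₁ (le_refl _) h2 h3 h5
      obtain ⟨ihe, ihge, ihgood⟩ := ih e₁ h3 h6 h7
      simp only [mSplit, if_pos hgap]
      exact ⟨by rw [step1, step2]; exact ihe, by omega, ihgood⟩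
    · -- blocked: inner stays at e
      simp only [mSplit, if_neg hgap]
      refine ⟨?_, le_refl e, ⟨h1, h2, h3, h4, h5, h6, h7⟩⟩
      have := inner_blocked flags mg s₁ e e e s₁ (by omega) (le_refl e) (by simp) (by omega)
        hs1 (by omega) hfalses (by omega)
      simpa using this

theorem outer_good (flags : List Bool) (mg ml : Int) : ∀ (N : Nat) (T : List (Nat × Nat)),
    T.length ≤ N → ∀ (i : Nat) (acc : List (Int × Int)), Good flags i T →
    outerA flags mg ml i acc = acc ++ (((mergeTop mg T).filter
      (fun p => (p.2 : Int) - (p.1 : Int) + 1 ≥ ml)).map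
      (fun p => ((p.1 : Int), (p.2 : Int)))) := by
  intro N
  induction N with
  | zero =>
    intro T hT i acc hg
    have : T = [] := by cases T <;> simp_all
    subst this
    rw [outerA]
    split
    · rename_i h
      have := skip_ge_len flags flags.length i (by omega) hg
      simp only [this, dif_pos]
      simp [mergeTop]
    · simp [mergeTop]
  | succ N ih =>
    intro T hT i acc hg
    cases T with
    | nil =>
      rw [outerA]
      split
      · rename_i h
        have := skip_ge_len flags flags.length i (by omega) hg
        simp only [this, dif_pos]
        simp [mergeTop]
      · simp [mergeTop]
    | cons p rest =>
      obtain ⟨s, e⟩ := p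
      obtain ⟨h1, h2, h3, h4, h5, h6, h7⟩ := hg
      rw [outerA]
      have hin : i < flags.length := by omega
      simp only [hin, dif_pos]
      have hskip : skipA flags i = s := skip_to flags (s - i) i s (le_refl _) h1 (by omega) h4
        (h5 s (le_refl s) h2)
      rw [hskip]
      have hsn : ¬ (flags.length ≤ s) := by omega
      simp only [hsn, dif_neg, not_false_iff]
      -- inner loop from s walks to e (trues) then merges via mSplit
      have hwithin : innerA flags mg s 0 s = innerA flags mg e 0 e :=
        inner_within flags mg (e - s) s e (le_refl _) h2 h3 h5
      obtain ⟨hie, _hge, hgood⟩ := inner_good flags mg rest e h3 h6 h7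
      set E := (mSplit mg e rest).1 with hE
      have hlt : innerA flags mg s 0 s = E := by rw [hwithin]; exact hie
      rw [hlt]
      have hrec := ih (mSplit mg e rest).2 (by have := mSplit_len mg rest e; simp at hT; omega)
        (E + 1) (if (E : Int) - (s : Int) + 1 ≥ ml then acc ++ [((s : Int), (E : Int))] else acc)
        hgood
      -- B side: mergeB splits as (s,E) :: mergeTop (mSplit ...)
      have hmerge : ∀ (r : List (Nat × Nat)) (cs ce : Nat),
          mergeB mg cs ce r = (cs, (mSplit mg ce r).1) :: mergeTop mg (mSplit mg ce r).2 := by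
        intro r
        induction r with
        | nil => intro cs ce; simp [mergeB, mSplit, mergeTop]
        | cons q r' ihm =>
          intro cs ce; obtain ⟨s₁, e₁⟩ := q
          by_cases hgap : (s₁ : Int) - (ce : Int) - 1 ≤ mg
          · simp only [mergeB, mSplit, if_pos hgap]; exact ihm cs e₁
          · simp only [mergeB, mSplit, if_neg hgap, mergeTop]
      show outerA flags mg ml (E + 1)
          (if (E : Int) - (s : Int) + 1 ≥ ml then acc ++ [((s : Int), (E : Int))] else acc) = _
      rw [hrec, show mergeTop mg ((s, e) :: rest) = mergeB mg s e rest from rfl, hmerge rest s e]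
      simp only [List.filter_cons]
      by_cases hml : (E : Int) - (s : Int) + 1 ≥ ml
      · rw [if_pos hml]
        rw [show (decide ((E : Int) - (s : Int) + 1 ≥ ml)) = true from by simpa using hml]
        simp
        exact hE
      · rw [if_neg hml]
        rw [show (decide ((E : Int) - (s : Int) + 1 ≥ ml)) = false from by simpa using hml]
        simp

-- ===== VERDICT (by name: the statement is the Claim_ definition above) =====
theorem segment_runs_with_gap_spec : Claim_equal_segment_runs_with_gap := by
  intro flags mg ml _
  unfold Spec_segment_runs_with_gap segment_runs_with_gap segment_runs_with_gap_alt
  have hgood : Good flags 0 (ivsB flags 0 none) :=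
    (ivsB_good flags flags 0 (by simp) (by intro t; simp)).1
  have := outer_good flags mg ml (ivsB flags 0 none).length (ivsB flags 0 none) (le_refl _) 0 [] hgood
  simpa using this
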